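-- pv_equiv track=rewrite | github.com/alterhz/ra2 | client/grid_manager.py | generate_search_offsets
-- ===== SOURCE A (Python) =====
-- def generate_search_offsets(max_radius):
--     """
--     动态生成搜索偏移量
--     按照顺时针螺旋方式生成坐标偏移
--     """
--     offsets = [(0, 0)]  # 首先是中心点
--
--     # 按照半径逐层生成偏移量
--     for radius in range(1, max_radius + 1):
--         # 从上边开始，顺时针生成
--         # 上边：从左到右
--         for x in range(-radius, radius + 1):
--             offsets.append((x, -radius))
--
--         # 右边：从上到下（排除顶点）
--         for y in range(-radius + 1, radius):
--             offsets.append((radius, y))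
--
--         # 下边：从右到左
--         for x in range(radius, -radius - 1, -1):
--             offsets.append((x, radius))
--
--         # 左边：从下到上（排除顶点）
--         for y in range(radius - 1, -radius, -1):
--             offsets.append((-radius, y))
--
--     return offsets
-- ===== SOURCE B (Python) =====
-- def generate_search_offsets(max_radius):
--     """Center first, then every other point of the square sorted by its closed-form
--     spiral index (ring number, then clockwise position starting at the ring's
--     top-left corner)."""
--     def spiral_index(p):
--         x, y = p
--         r = max(abs(x), abs(y))
--         if y == -r:
--             t = x + r            # top edge, left to right
--         elif x == r:
--             t = 3 * r + y        # right edge, top to bottom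
--         elif y == r:
--             t = 5 * r - x        # bottom edge, right to left
--         else:
--             t = 7 * r - y        # left edge, bottom to top
--         return (2 * r - 1) ** 2 + t
--     span = range(-max_radius, max_radius + 1)
--     points = [(x, y) for x in span for y in span if (x, y) != (0, 0)]
--     return [(0, 0)] + sorted(points, key=spiral_index)
-- ===== Notes on version B (the rewrite author's own statement) =====
-- stated objective: alternative
-- what changed: Replaces A's constructive ring-by-ring edge loops by generate-then-sort: enumerate every point of the square, assign each a closed-form spiral index (ring, then clockwise position), and sort by that key; the center is emitted separately.
import Mathlib
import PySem

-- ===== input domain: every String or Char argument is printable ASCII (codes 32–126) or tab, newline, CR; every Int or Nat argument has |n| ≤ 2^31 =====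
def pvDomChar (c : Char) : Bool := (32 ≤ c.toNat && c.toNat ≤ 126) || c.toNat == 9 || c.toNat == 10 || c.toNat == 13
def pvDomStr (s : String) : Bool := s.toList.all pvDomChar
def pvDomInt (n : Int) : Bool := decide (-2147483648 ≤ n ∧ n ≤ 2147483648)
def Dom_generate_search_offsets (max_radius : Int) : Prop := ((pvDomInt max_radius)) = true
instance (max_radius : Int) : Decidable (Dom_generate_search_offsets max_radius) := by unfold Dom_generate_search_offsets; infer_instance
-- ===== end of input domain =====

-- B replaces A's constructive ring-by-ring edge loops by generate-then-sort with a
-- closed-form spiral-index key; alternative decomposition, same result.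

-- ===== PORT A =====
def generate_search_offsets (max_radius : Int) : List (Int × Int) :=
  (PySem.List.pyRange 1 (max_radius + 1) 1).foldl (fun offsets radius =>
    let o1 := (PySem.List.pyRange (-radius) (radius + 1) 1).foldl
        (fun acc x => acc ++ [(x, -radius)]) offsets
    let o2 := (PySem.List.pyRange (-radius + 1) radius 1).foldl
        (fun acc y => acc ++ [(radius, y)]) o1
    let o3 := (PySem.List.pyRange radius (-radius - 1) (-1)).foldl
        (fun acc x => acc ++ [(x, radius)]) o2
    let o4 := (PySem.List.pyRange (radius - 1) (-radius) (-1)).foldl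
        (fun acc y => acc ++ [(-radius, y)]) o3
    o4) [(0, 0)]

-- ===== PORT B =====
-- spiral_index(p): ring number, then clockwise position along the ring
def pvSpiralIndex (p : Int × Int) : Int :=
  let x := p.1
  let y := p.2
  let r := max |x| |y|
  let t := if y = -r then x + r
           else if x = r then 3 * r + y
           else if y = r then 5 * r - x
           else 7 * r - y
  (2 * r - 1) ^ 2 + t

-- points = [(x, y) for x in span for y in span if (x, y) != (0, 0)]
def pvPoints (max_radius : Int) : List (Int × Int) :=
  (PySem.List.pyRange (-max_radius) (max_radius + 1) 1).flatMap (fun x =>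
    ((PySem.List.pyRange (-max_radius) (max_radius + 1) 1).map (fun y => (x, y))).filter
      (fun p => p ≠ (0, 0)))

def generate_search_offsets_alt (max_radius : Int) : List (Int × Int) :=
  [(0, 0)] ++ PySem.List.sorted (pvPoints max_radius) pvSpiralIndex

-- ===== PRECONDITION & SPEC =====
def Spec_generate_search_offsets (max_radius : Int) (out : List (Int × Int)) : Prop := out = generate_search_offsets_alt max_radius
instance (max_radius : Int) (out : List (Int × Int)) : Decidable (Spec_generate_search_offsets max_radius out) := by unfold Spec_generate_search_offsets; infer_instance

-- ===== CLAIM (what is proved, stated in full; the proofs are below) =====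
def Claim_equal_generate_search_offsets : Prop := ∀ (max_radius : Int), Dom_generate_search_offsets max_radius → Spec_generate_search_offsets max_radius (generate_search_offsets max_radius)

-- ===== LEMMAS AND PROOFS =====

-- the point of ring radius s at clockwise position t (inverse of pvSpiralIndex on the ring)
def pvPointOf (s : Int) (t : Nat) : Int × Int :=
  if (t : Int) ≤ 2 * s then ((t : Int) - s, -s)
  else if (t : Int) ≤ 4 * s then (s, (t : Int) - 3 * s)
  else if (t : Int) ≤ 6 * s then (5 * s - (t : Int), s)
  else (-s, 7 * s - (t : Int))

-- the ring of radius m+1, as A produces it, in closed indexed form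
def pvRing (m : Nat) : List (Int × Int) :=
  (List.range (8 * (m + 1))).map (pvPointOf ((m : Int) + 1))

theorem pvSpiralIndex_pointOf (m : Nat) (t : Nat) (ht : t < 8 * (m + 1)) :
    pvSpiralIndex (pvPointOf ((m : Int) + 1) t) = (((2 * m + 1) ^ 2 : Nat) : Int) + t := by
  have hsq : (((2 * m + 1) ^ 2 : Nat) : Int) = (2 * ((m : Int) + 1) - 1) ^ 2 := by push_cast; ring
  rw [hsq]
  unfold pvPointOf
  split_ifs with h1 h2 h3
  · have hr : max |(t : Int) - ((m : Int) + 1)| |(-((m : Int) + 1))| = (m : Int) + 1 := by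
      simp only [Int.abs_eq_natAbs]; omega
    simp only [pvSpiralIndex, hr]
    split_ifs <;> (congr 1; push_cast at *; omega)
  · have hr : max |((m : Int) + 1)| |(t : Int) - 3 * ((m : Int) + 1)| = (m : Int) + 1 := by
      simp only [Int.abs_eq_natAbs]; omega
    simp only [pvSpiralIndex, hr]
    split_ifs <;> (congr 1; push_cast at *; omega)
  · have hr : max |5 * ((m : Int) + 1) - (t : Int)| |((m : Int) + 1)| = (m : Int) + 1 := by
      simp only [Int.abs_eq_natAbs]; omega
    simp only [pvSpiralIndex, hr]
    split_ifs <;> (congr 1; push_cast at *; omega)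
  · have hr : max |(-((m : Int) + 1))| |7 * ((m : Int) + 1) - (t : Int)| = (m : Int) + 1 := by
      simp only [Int.abs_eq_natAbs]; omega
    simp only [pvSpiralIndex, hr]
    split_ifs <;> (congr 1; push_cast at *; omega)

-- A's four edge loops at radius m+1, rewritten as maps over List.range
theorem pvEdges_eq (m : Nat) (offs : List (Int × Int)) :
    List.foldl (fun acc y => acc ++ [(-((m:Int)+1), y)])
      (List.foldl (fun acc x => acc ++ [(x, (m:Int)+1)])
        (List.foldl (fun acc y => acc ++ [((m:Int)+1, y)])
          (List.foldl (fun acc x => acc ++ [(x, -((m:Int)+1))]) offs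
            (PySem.List.pyRange (-((m:Int)+1)) ((m:Int)+1+1)))
          (PySem.List.pyRange (-((m:Int)+1)+1) ((m:Int)+1)))
        (PySem.List.pyRange ((m:Int)+1) (-((m:Int)+1)-1) (-1)))
      (PySem.List.pyRange ((m:Int)+1-1) (-((m:Int)+1)) (-1))
    = offs ++ ((List.range (2*m+3)).map (fun k : Nat => (-((m:Int)+1) + ↑k, -((m:Int)+1)))
           ++ ((List.range (2*m+1)).map (fun k : Nat => (((m:Int)+1), -((m:Int)+1) + 1 + ↑k))
           ++ ((List.range (2*m+3)).map (fun k : Nat => (((m:Int)+1) - ↑k, ((m:Int)+1)))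
           ++ (List.range (2*m+1)).map (fun k : Nat => (-((m:Int)+1), ((m:Int)+1) - 1 - ↑k))))) := by
  simp only [PySem.List.foldl_append_singleton_eq_map,
    PySem.List.pyRange_one, PySem.List.pyRange_neg_one, List.map_map]
  rw [show ((m:Int) + 1 + 1 - -((m:Int) + 1)).toNat = 2*m+3 from by omega,
      show ((m:Int) + 1 - (-((m:Int) + 1) + 1)).toNat = 2*m+1 from by omega,
      show ((m:Int) + 1 - (-((m:Int) + 1) - 1)).toNat = 2*m+3 from by omega,
      show ((m:Int) + 1 - 1 - -((m:Int) + 1)).toNat = 2*m+1 from by omega]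
  simp only [Function.comp_def, List.append_assoc]

-- pvRing m is those same four edges
theorem pvRing_split (m : Nat) :
    pvRing m
    = (List.range (2*m+3)).map (fun k : Nat => (-((m:Int)+1) + ↑k, -((m:Int)+1)))
      ++ ((List.range (2*m+1)).map (fun k : Nat => (((m:Int)+1), -((m:Int)+1) + 1 + ↑k))
      ++ ((List.range (2*m+3)).map (fun k : Nat => (((m:Int)+1) - ↑k, ((m:Int)+1)))
      ++ (List.range (2*m+1)).map (fun k : Nat => (-((m:Int)+1), ((m:Int)+1) - 1 - ↑k)))) := by
  unfold pvRing
  rw [show (8*(m+1)) = (2*m+3) + ((2*m+1) + ((2*m+3) + (2*m+1))) from by ring,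
      @List.range_add (2*m+3) ((2*m+1) + ((2*m+3) + (2*m+1))),
      @List.range_add (2*m+1) ((2*m+3) + (2*m+1)),
      @List.range_add (2*m+3) (2*m+1)]
  simp only [List.map_append, List.map_map]
  refine congrArg₂ (· ++ ·) ?_ (congrArg₂ (· ++ ·) ?_ (congrArg₂ (· ++ ·) ?_ ?_)) <;>
    · refine List.map_congr_left fun k hk => ?_
      have hk' := List.mem_range.mp hk
      simp only [Function.comp_def, pvPointOf]
      split_ifs <;> (simp only [Prod.mk.injEq, and_true, true_and]; omega)

theorem pvRing_eq_edges (m : Nat) (offs : List (Int × Int)) :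
    List.foldl (fun acc y => acc ++ [(-((m:Int)+1), y)])
      (List.foldl (fun acc x => acc ++ [(x, (m:Int)+1)])
        (List.foldl (fun acc y => acc ++ [((m:Int)+1, y)])
          (List.foldl (fun acc x => acc ++ [(x, -((m:Int)+1))]) offs
            (PySem.List.pyRange (-((m:Int)+1)) ((m:Int)+1+1)))
          (PySem.List.pyRange (-((m:Int)+1)+1) ((m:Int)+1)))
        (PySem.List.pyRange ((m:Int)+1) (-((m:Int)+1)-1) (-1)))
      (PySem.List.pyRange ((m:Int)+1-1) (-((m:Int)+1)) (-1))
    = offs ++ pvRing m := by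
  rw [pvEdges_eq, pvRing_split]

-- A on a nonnegative radius, closed form
theorem pvA_eq (R : Nat) :
    generate_search_offsets (R : Int) = [(0, 0)] ++ (List.range R).flatMap pvRing := by
  unfold generate_search_offsets
  rw [PySem.List.pyRange_one, show ((R : Int) + 1 - 1).toNat = R from by omega]
  induction R with
  | zero => rfl
  | succ n ih =>
    rw [List.range_succ, List.map_append, List.foldl_append, ih]
    simp only [List.map_cons, List.map_nil, List.foldl_cons, List.foldl_nil]
    rw [show (1 + (n : Int)) = (n : Int) + 1 from by ring]
    rw [pvRing_eq_edges n ([(0, 0)] ++ (List.range n).flatMap pvRing)]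
    simp [List.flatMap_append, List.append_assoc]

theorem pvKeys (R : Nat) :
    ((List.range R).flatMap pvRing).map pvSpiralIndex
    = (List.range ((2 * R + 1) ^ 2 - 1)).map (fun i : Nat => (i : Int) + 1) := by
  induction R with
  | zero => rfl
  | succ n ih =>
    rw [List.range_succ, List.flatMap_append, List.map_append, ih]
    have hring : (List.flatMap pvRing [n]).map pvSpiralIndex
        = (List.range (8 * (n + 1))).map (fun t : Nat => (((2 * n + 1) ^ 2 : Nat) : Int) + t) := by
      simp only [List.flatMap_cons, List.flatMap_nil, List.append_nil]
      unfold pvRing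
      rw [List.map_map]
      exact List.map_congr_left fun t ht => pvSpiralIndex_pointOf n t (List.mem_range.mp ht)
    rw [hring]
    have hsq : (2 * (n + 1) + 1) ^ 2 = (2 * n + 1) ^ 2 + 8 * (n + 1) := by ring
    have h1 : 0 < (2 * n + 1) ^ 2 := pow_pos (by omega) 2
    rw [show (2 * (n + 1) + 1) ^ 2 - 1 = ((2 * n + 1) ^ 2 - 1) + 8 * (n + 1) from by omega,
        List.range_add, List.map_append, List.map_map]
    congr 1
    refine List.map_congr_left fun t _ => ?_
    simp only [Function.comp_def]
    omega

theorem pvTail_pairwise (R : Nat) :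
    ((List.range R).flatMap pvRing).Pairwise (fun a b => pvSpiralIndex a < pvSpiralIndex b) := by
  rw [← List.pairwise_map (f := pvSpiralIndex), pvKeys]
  exact List.pairwise_lt_range.map _ (fun a b h => by omega)

theorem pvTail_nodup (R : Nat) : ((List.range R).flatMap pvRing).Nodup :=
  List.nodup_iff_pairwise_ne.mpr
    ((pvTail_pairwise R).imp fun h => fun e => absurd (e ▸ h) (lt_irrefl _))

theorem pvMem_ring (m : Nat) (px py : Int) :
    (px, py) ∈ pvRing m ↔ max |px| |py| = (m : Int) + 1 := by
  unfold pvRing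
  rw [List.mem_map]
  constructor
  · rintro ⟨t, ht, heq⟩
    have ht' := List.mem_range.mp ht
    unfold pvPointOf at heq
    split_ifs at heq <;>
      (simp only [Prod.mk.injEq] at heq; simp only [Int.abs_eq_natAbs]; omega)
  · intro h
    have hb : -((m : Int) + 1) ≤ px ∧ px ≤ (m : Int) + 1 ∧ -((m : Int) + 1) ≤ py ∧
        py ≤ (m : Int) + 1 ∧ (px = (m : Int) + 1 ∨ px = -((m : Int) + 1) ∨
          py = (m : Int) + 1 ∨ py = -((m : Int) + 1)) := by
      simp only [Int.abs_eq_natAbs] at h; omega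
    by_cases hy : py = -((m : Int) + 1)
    · refine ⟨(px + ((m : Int) + 1)).toNat, List.mem_range.mpr (by omega), ?_⟩
      unfold pvPointOf
      rw [if_pos (by omega)]
      simp only [Prod.mk.injEq, and_true, true_and]; omega
    by_cases hx : px = (m : Int) + 1
    · refine ⟨(3 * ((m : Int) + 1) + py).toNat, List.mem_range.mpr (by omega), ?_⟩
      unfold pvPointOf
      rw [if_neg (by omega), if_pos (by omega)]
      simp only [Prod.mk.injEq, and_true, true_and]; omega
    by_cases hy2 : py = (m : Int) + 1
    · refine ⟨(5 * ((m : Int) + 1) - px).toNat, List.mem_range.mpr (by omega), ?_⟩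
      unfold pvPointOf
      rw [if_neg (by omega), if_neg (by omega), if_pos (by omega)]
      simp only [Prod.mk.injEq, and_true, true_and]; omega
    · refine ⟨(7 * ((m : Int) + 1) - py).toNat, List.mem_range.mpr (by omega), ?_⟩
      unfold pvPointOf
      rw [if_neg (by omega), if_neg (by omega), if_neg (by omega)]
      simp only [Prod.mk.injEq, and_true, true_and]; omega

theorem pvMem_points (S : Int) (px py : Int) :
    (px, py) ∈ pvPoints S ↔ (-S ≤ px ∧ px < S + 1 ∧ -S ≤ py ∧ py < S + 1 ∧ (px, py) ≠ (0, 0)) := by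
  unfold pvPoints
  simp only [List.mem_flatMap, List.mem_filter, List.mem_map, PySem.List.mem_pyRange_one]
  constructor
  · rintro ⟨x, hx, hmem, hne⟩
    obtain ⟨y, hy, heq⟩ := hmem
    have hpx : px = x := (congrArg Prod.fst heq).symm
    have hpy : py = y := (congrArg Prod.snd heq).symm
    subst hpx; subst hpy
    exact ⟨hx.1, hx.2, hy.1, hy.2, of_decide_eq_true hne⟩
  · rintro ⟨h1, h2, h3, h4, hne⟩
    exact ⟨px, ⟨h1, h2⟩, ⟨py, ⟨h3, h4⟩, rfl⟩, decide_eq_true hne⟩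

theorem pvPyRange_nodup (a b : Int) : (PySem.List.pyRange a b).Nodup := by
  rw [PySem.List.pyRange_one]
  exact List.nodup_range.map (fun i j h => by omega)

theorem pvPoints_nodup (S : Int) : (pvPoints S).Nodup := by
  unfold pvPoints
  refine List.nodup_flatMap.mpr ⟨fun x _ => ?_, ?_⟩
  · exact (List.Nodup.map (fun i j h => by simpa using congrArg Prod.snd h) (pvPyRange_nodup _ _)).filter _
  · refine ((pvPyRange_nodup (-S) (S + 1)).imp ?_)
    intro a b hab p hpa hpb
    have h1 : p.1 = a := by
      rcases List.mem_filter.mp hpa with ⟨hm, _⟩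
      obtain ⟨y, _, rfl⟩ := List.mem_map.mp hm
      rfl
    have h2 : p.1 = b := by
      rcases List.mem_filter.mp hpb with ⟨hm, _⟩
      obtain ⟨y, _, rfl⟩ := List.mem_map.mp hm
      rfl
    exact hab (h1 ▸ h2)

theorem pvTail_perm (R : Nat) :
    ((List.range R).flatMap pvRing).Perm (pvPoints (R : Int)) := by
  rw [List.perm_ext_iff_of_nodup (pvTail_nodup R) (pvPoints_nodup _)]
  intro p
  obtain ⟨px, py⟩ := p
  rw [pvMem_points]
  constructor
  · intro hp
    obtain ⟨m, hm, hmem⟩ := List.mem_flatMap.mp hp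
    have hmx := (pvMem_ring m px py).mp hmem
    have hmR := List.mem_range.mp hm
    have hne : (px, py) ≠ (0, 0) := by
      intro e
      obtain ⟨e1, e2⟩ : px = 0 ∧ py = 0 := by simpa using e
      rw [e1, e2] at hmx
      simp at hmx
      omega
    refine ⟨?_, ?_, ?_, ?_, hne⟩ <;> (simp only [Int.abs_eq_natAbs] at hmx; omega)
  · rintro ⟨h1, h2, h3, h4, hne⟩
    have hne' : ¬(px = 0 ∧ py = 0) := by
      intro e
      exact hne (by rw [e.1, e.2])
    have hM : 1 ≤ max |px| |py| ∧ max |px| |py| ≤ (R : Int) := by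
      simp only [Int.abs_eq_natAbs]; omega
    refine List.mem_flatMap.mpr ⟨(max |px| |py| - 1).toNat, List.mem_range.mpr ?_, ?_⟩
    · simp only [Int.abs_eq_natAbs] at hM ⊢; omega
    · rw [pvMem_ring]
      simp only [Int.abs_eq_natAbs] at hM ⊢; omega

-- ===== VERDICT (by name: the statement is the Claim_ definition above) =====
theorem generate_search_offsets_spec : Claim_equal_generate_search_offsets := by
  intro max_radius _
  unfold Spec_generate_search_offsets
  by_cases h : 0 ≤ max_radius
  · obtain ⟨R, rfl⟩ : ∃ R : Nat, max_radius = (R : Int) := ⟨max_radius.toNat, by omega⟩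
    rw [pvA_eq R]
    unfold generate_search_offsets_alt
    rw [PySem.List.sorted_eq_of_perm_of_pairwise_lt _ _ pvSpiralIndex (pvTail_perm R) (pvTail_pairwise R)]
  · have hA : generate_search_offsets max_radius = [(0, 0)] := by
      unfold generate_search_offsets
      rw [PySem.List.pyRange_one, show (max_radius + 1 - 1).toNat = 0 from by omega]
      rfl
    have hP : pvPoints max_radius = [] := by
      unfold pvPoints
      rw [PySem.List.pyRange_one, show (max_radius + 1 - -max_radius).toNat = 0 from by omega]
      rfl
    rw [hA]
    unfold generate_search_offsets_alt
    rw [hP]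
    rfl
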